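-- pv_equiv track=rewrite | github.com/Theo-Ing/completed-projects | theoi_labb-3/allaUppgifter.py | reverseRov
-- ===== SOURCE A (Python) =====
-- kons = "qwrtpsdfghjklzxcvbnmQWRTPSDFGHJKLZXCVBNM"
--
-- def reverseRov(text):
--     output = ""
--     rovCounter = 0
--     for tkn in text:
--         if rovCounter>0:
--             rovCounter -= 1
--         elif tkn in kons:
--             output += tkn
--             rovCounter = 2
--         else:
--             output += tkn
--     return output
-- ===== SOURCE B (Python) =====
-- kons = "qwrtpsdfghjklzxcvbnmQWRTPSDFGHJKLZXCVBNM"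
--
-- def reverseRov(text):
--     # chunked decoding: find the next consonant, copy the whole slice up to and
--     # including it in one piece, then resume 2 positions past the consonant
--     parts = []
--     i = 0
--     n = len(text)
--     while i < n:
--         j = i
--         while j < n and text[j] not in kons:
--             j += 1
--         if j < n:
--             parts.append(text[i:j + 1])
--             i = j + 3
--         else:
--             parts.append(text[i:])
--             i = n
--     return "".join(parts)
-- ===== Notes on version B (the rewrite author's own statement) =====
-- stated objective: alternative
-- what changed: Replaced A's per-character skip-counter state machine with a chunked two-level scan: an inner loop finds the next consonant, the whole slice up to and including it is copied in one piece, and decoding resumes two positions past the consonant.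
import Mathlib
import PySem

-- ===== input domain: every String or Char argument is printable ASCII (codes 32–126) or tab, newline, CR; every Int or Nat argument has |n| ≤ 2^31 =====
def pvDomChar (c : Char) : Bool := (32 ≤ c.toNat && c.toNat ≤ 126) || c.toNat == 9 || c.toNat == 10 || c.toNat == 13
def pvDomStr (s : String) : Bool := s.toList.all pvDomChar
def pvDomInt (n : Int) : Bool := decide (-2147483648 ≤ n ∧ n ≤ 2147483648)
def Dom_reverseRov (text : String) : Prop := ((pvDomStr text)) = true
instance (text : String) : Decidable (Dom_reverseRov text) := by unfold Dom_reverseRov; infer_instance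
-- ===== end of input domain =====

-- B replaces A's per-character skip-counter state machine by a chunked scan that copies
-- whole slices up to each consonant (alternative decomposition); return values proved equal on all inputs.

-- ===== PORT A =====
def pvKons : List Char := "qwrtpsdfghjklzxcvbnmQWRTPSDFGHJKLZXCVBNM".toList

-- the for-loop of A, state = (output, rovCounter)
def reverseRovGo (cs : List Char) (out : List Char) (rovCounter : Nat) : List Char :=
  match cs with
  | [] => out
  | tkn :: rest =>
    if rovCounter > 0 then reverseRovGo rest out (rovCounter - 1)
    else if pvKons.contains tkn then reverseRovGo rest (out ++ [tkn]) 2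
    else reverseRovGo rest (out ++ [tkn]) rovCounter

def reverseRov (text : String) : String :=
  String.ofList (reverseRovGo text.toList [] 0)

-- ===== PORT B =====
-- inner while loop of Source B: scan forward to the next consonant; return the slice up to
-- and including it together with the remainder two positions further (i = j + 3),
-- or (the whole rest, none) when no consonant remains
def pvSegAfter (cs : List Char) : List Char × Option (List Char) :=
  match cs with
  | [] => ([], none)
  | c :: rest =>
    if pvKons.contains c then ([c], some (rest.drop 2))
    else
      let (seg, r) := pvSegAfter rest
      (c :: seg, r)

lemma pvSegAfter_some_length : ∀ (cs seg r : List Char),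
    pvSegAfter cs = (seg, some r) → r.length < cs.length := by
  intro cs
  induction cs with
  | nil => intro seg r h; simp [pvSegAfter] at h
  | cons c rest ih =>
    intro seg r h
    rw [pvSegAfter] at h
    by_cases hk : pvKons.contains c
    · rw [if_pos hk] at h
      have h2 : some (rest.drop 2) = some r := congrArg Prod.snd h
      have hr : r = rest.drop 2 := (Option.some.injEq .. ▸ h2).symm
      subst hr
      simp only [List.length_drop, List.length_cons]
      omega
    · rw [if_neg hk] at h
      have h2 : (pvSegAfter rest).2 = some r := congrArg Prod.snd h
      have hlt := ih (pvSegAfter rest).1 r (by rw [← h2])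
      simp only [List.length_cons]
      omega

-- outer while loop of Source B: emit the chunk, continue after the consonant's two tails
def reverseRovAltGo (cs : List Char) : List Char :=
  match h : pvSegAfter cs with
  | (seg, none) => seg
  | (seg, some rest) => seg ++ reverseRovAltGo rest
termination_by cs.length
decreasing_by exact pvSegAfter_some_length _ _ _ h

def reverseRov_alt (text : String) : String :=
  String.ofList (reverseRovAltGo text.toList)

-- ===== PRECONDITION & SPEC =====
def Spec_reverseRov (text : String) (out : String) : Prop := out = reverseRov_alt text
instance (text : String) (out : String) : Decidable (Spec_reverseRov text out) := by unfold Spec_reverseRov; infer_instance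

-- ===== CLAIM (what is proved, stated in full; the proofs are below) =====
def Claim_equal_reverseRov : Prop := ∀ (text : String), Dom_reverseRov text → Spec_reverseRov text (reverseRov text)

-- ===== LEMMAS AND PROOFS =====

lemma pvSegAfter_cons_kons (c : Char) (rest : List Char) (h : pvKons.contains c) :
    pvSegAfter (c :: rest) = ([c], some (rest.drop 2)) := by
  rw [pvSegAfter, if_pos h]

lemma pvSegAfter_cons_nonkons (c : Char) (rest : List Char) (h : ¬ pvKons.contains c) :
    pvSegAfter (c :: rest) = (c :: (pvSegAfter rest).1, (pvSegAfter rest).2) := by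
  rw [pvSegAfter, if_neg h]

lemma altGo_unfold (cs : List Char) : reverseRovAltGo cs =
    (pvSegAfter cs).1 ++
      (match (pvSegAfter cs).2 with | none => [] | some r => reverseRovAltGo r) := by
  rw [reverseRovAltGo]
  split
  · rename_i seg hs; simp [hs]
  · rename_i seg rest hs; simp [hs]

lemma altGo_nil : reverseRovAltGo [] = [] := by
  rw [altGo_unfold]; simp [pvSegAfter]

lemma altGo_cons_kons {c : Char} (rest : List Char) (h : pvKons.contains c) :
    reverseRovAltGo (c :: rest) = c :: reverseRovAltGo (rest.drop 2) := by
  rw [altGo_unfold, pvSegAfter_cons_kons c rest h]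
  simp

lemma altGo_cons_nonkons {c : Char} (rest : List Char) (h : ¬ pvKons.contains c) :
    reverseRovAltGo (c :: rest) = c :: reverseRovAltGo rest := by
  rw [altGo_unfold (c :: rest), pvSegAfter_cons_nonkons c rest h, altGo_unfold rest]
  simp

-- A's positive counter just drops the next k characters
lemma reverseRovGo_skip (k : Nat) : ∀ (cs out : List Char),
    reverseRovGo cs out k = reverseRovGo (cs.drop k) out 0 := by
  induction k with
  | zero => intro cs out; simp
  | succ k ih =>
    intro cs out
    cases cs with
    | nil => simp [reverseRovGo]
    | cons c rest => simp [reverseRovGo, ih]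

lemma reverseRovGo_eq_alt : ∀ (n : Nat) (cs out : List Char), cs.length ≤ n →
    reverseRovGo cs out 0 = out ++ reverseRovAltGo cs := by
  intro n
  induction n with
  | zero =>
    intro cs out h
    have : cs = [] := List.length_eq_zero_iff.mp (Nat.le_zero.mp h)
    subst this; simp [reverseRovGo, altGo_nil]
  | succ n ih =>
    intro cs out h
    cases cs with
    | nil => simp [reverseRovGo, altGo_nil]
    | cons c rest =>
      simp at h
      by_cases hk : pvKons.contains c
      · rw [reverseRovGo]
        simp only [hk, if_pos, Nat.lt_irrefl, if_false]
        rw [reverseRovGo_skip, ih _ _ (by simp only [List.length_drop]; omega),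
          altGo_cons_kons rest hk]
        simp
      · rw [reverseRovGo, if_neg (by omega : ¬(0 > 0)), if_neg hk,
          ih _ _ (by omega), altGo_cons_nonkons rest hk]
        simp

-- ===== VERDICT (by name: the statement is the Claim_ definition above) =====
theorem reverseRov_spec : Claim_equal_reverseRov := by
  intro text _
  unfold Spec_reverseRov reverseRov reverseRov_alt
  rw [reverseRovGo_eq_alt text.toList.length _ _ le_rfl]
  simp
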